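-- pv_equiv track=rewrite | github.com/redundan3y/deeplTools | deepTools/deepTools.py | generateOutputFilename
-- ===== SOURCE A (Python) =====
-- def generateOutputFilename(src_file_fame):
--     output_filename = ''
--     split = src_file_fame.split(".")
--     split.insert(0, "[PL] ")
--     flag = 0
--     for words in split:
--         if flag == 0:
--             output_filename = output_filename + words
--             flag = 1
--         else:
--             output_filename = output_filename + words + '.'
--     return output_filename.rstrip('.')
-- ===== SOURCE B (Python) =====
-- def generateOutputFilename(src_file_fame):
--     return ('[PL] ' + src_file_fame).rstrip('.')
-- ===== Notes on version B (the rewrite author's own statement) =====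
-- stated objective: simpler
-- what changed: Splitting on the dot separator and rejoining the parts with it reconstructs the string, so A's split/insert/flag-loop/join collapses to a single closed-form expression: prepend the fixed prefix and strip trailing dots.
import Mathlib
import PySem

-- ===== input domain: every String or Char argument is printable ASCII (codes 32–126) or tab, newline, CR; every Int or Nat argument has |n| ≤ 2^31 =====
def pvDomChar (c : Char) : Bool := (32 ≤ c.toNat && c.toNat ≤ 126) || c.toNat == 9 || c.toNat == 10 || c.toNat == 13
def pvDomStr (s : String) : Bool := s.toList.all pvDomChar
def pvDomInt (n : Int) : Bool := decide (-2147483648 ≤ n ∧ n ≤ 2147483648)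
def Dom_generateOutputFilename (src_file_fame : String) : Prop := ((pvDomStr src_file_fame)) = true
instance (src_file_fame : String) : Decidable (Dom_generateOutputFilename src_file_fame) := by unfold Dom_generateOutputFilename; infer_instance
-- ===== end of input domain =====

-- B replaces A's split/insert/flag-loop/join by a closed form: prefix '[PL] ' and strip trailing dots (objective: simpler).

-- s.rstrip('.') — hand port, exact: drop the maximal run of '.' at the right end (PySem has no chars-rstrip)
def pvRstripDots (cs : List Char) : List Char := (cs.reverse.dropWhile (· == '.')).reverse

-- ===== PORT A =====
def generateOutputFilename (src_file_fame : String) : String :=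
  -- output_filename = ''; split = src.split("."); split.insert(0, "[PL] ")
  let split : List (List Char) := "[PL] ".toList :: PySem.Chars.splitOn src_file_fame.toList ['.']
  -- for words in split: first word appended bare (flag 0→1), later words appended with a trailing '.'
  let st := split.foldl
    (fun (st : List Char × Int) words =>
      if st.2 == 0 then (st.1 ++ words, 1) else (st.1 ++ words ++ ['.'], st.2))
    ([], 0)
  -- return output_filename.rstrip('.')
  String.mk (pvRstripDots st.1)

-- ===== PORT B =====
def generateOutputFilename_alt (src_file_fame : String) : String :=
  -- return ('[PL] ' + src_file_fame).rstrip('.')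
  String.mk (pvRstripDots ("[PL] ".toList ++ src_file_fame.toList))

-- ===== PRECONDITION & SPEC =====
def Spec_generateOutputFilename (src_file_fame : String) (out : String) : Prop := out = generateOutputFilename_alt src_file_fame
instance (src_file_fame : String) (out : String) : Decidable (Spec_generateOutputFilename src_file_fame out) := by unfold Spec_generateOutputFilename; infer_instance

-- ===== CLAIM (what is proved, stated in full; the proofs are below) =====
def Claim_equal_generateOutputFilename : Prop := ∀ (src_file_fame : String), Dom_generateOutputFilename src_file_fame → Spec_generateOutputFilename src_file_fame (generateOutputFilename src_file_fame)

-- ===== LEMMAS AND PROOFS =====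

-- the flag-1 tail of A's loop appends each word followed by '.'
theorem pv_foldl_flag1 (ws : List (List Char)) : ∀ (acc : List Char),
    (ws.foldl (fun (st : List Char × Int) words =>
      if st.2 == 0 then (st.1 ++ words, 1) else (st.1 ++ words ++ ['.'], st.2)) (acc, 1)).1
    = acc ++ ws.flatMap (· ++ ['.']) := by
  induction ws with
  | nil => intro acc; simp
  | cons w ws ih =>
    intro acc
    simp only [List.foldl_cons, List.flatMap_cons]
    have h1 : ((1 : Int) == 0) = false := by decide
    rw [if_neg (by simp), ih]
    simp [List.append_assoc]

-- appending '.' to every piece of splitOn-by-'.' reconstructs the string plus one trailing '.'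
theorem pv_go_flat (fuel : Nat) : ∀ (l cur : List Char) (acc : List (List Char)),
    (PySem.Chars.splitOn.go ['.'] fuel l cur acc).flatMap (· ++ ['.'])
    = acc.reverse.flatMap (· ++ ['.']) ++ cur.reverse ++ l ++ ['.'] := by
  induction fuel with
  | zero =>
    intro l cur acc
    simp [PySem.Chars.splitOn.go, List.append_assoc]
  | succ fuel ih =>
    intro l cur acc
    cases l with
    | nil => simp [PySem.Chars.splitOn.go]
    | cons c rest =>
      by_cases h : (['.'] : List Char).isPrefixOf (c :: rest) = true
      · have hc : c = '.' := by
          simp [List.isPrefixOf] at h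
          exact h.symm
        simp only [PySem.Chars.splitOn.go, h, if_pos]
        rw [ih]
        subst hc
        simp [List.append_assoc]
      · simp only [PySem.Chars.splitOn.go]
        rw [if_neg h, ih]
        simp [List.append_assoc]

theorem pv_splitOn_flat (cs : List Char) :
    (PySem.Chars.splitOn cs ['.']).flatMap (· ++ ['.']) = cs ++ ['.'] := by
  unfold PySem.Chars.splitOn
  rw [pv_go_flat]
  simp

theorem pv_rstrip_dot (xs : List Char) : pvRstripDots (xs ++ ['.']) = pvRstripDots xs := by
  simp [pvRstripDots]

-- ===== VERDICT (by name: the statement is the Claim_ definition above) =====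
theorem generateOutputFilename_spec : Claim_equal_generateOutputFilename := by
  intro s _
  unfold Spec_generateOutputFilename generateOutputFilename generateOutputFilename_alt
  simp only [List.foldl_cons]
  have h0 : (((([] : List Char) ++ "[PL] ".toList, (1 : Int)))) = ("[PL] ".toList, (1 : Int)) := by simp
  rw [show (if ((0 : Int) == 0) = true then ((([] : List Char) ++ "[PL] ".toList), (1:Int))
        else (([] : List Char) ++ "[PL] ".toList ++ ['.'], (0:Int))) = ("[PL] ".toList, (1:Int)) by simp,
      pv_foldl_flag1, pv_splitOn_flat, ← List.append_assoc, pv_rstrip_dot]
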